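-- pv_equiv track=rewrite | github.com/pypi-data/pypi-mirror-287 | packages/utilmy/utilmy-0.1.17219658.tar.gz/utilmy-0.1.17219658/utilmy/tools/cli_conda_merge.py | prioritySort
-- ===== SOURCE A (Python) =====
-- def getPriorityList():
--     """
--     A simple funciton that reutrns all the packages that
--     need to be treated as high-priority dependencies
--     """
--     priorities = ['pytorch', 'tensorflow']
--     return priorities
--
-- def prioritySort(dependencies):
--     """
--     Function that will sort the dependencies for pip's requirements.txt format
--     while prioritizing the packages defined in getPriorityList() function
--     """
--     priorityList = getPriorityList()
--
--     # Removing duplicates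
--     dependencies = list(dict.fromkeys(dependencies))
--
--     for i in dependencies:
--         for priority in priorityList:
--             if i.startswith(priority):
--                 dependencies.insert(0, dependencies.pop(dependencies.index(i)))
--                 continue
--
--     return dependencies
-- ===== SOURCE B (Python) =====
-- def getPriorityList():
--     priorities = ['pytorch', 'tensorflow']
--     return priorities
--
-- def prioritySort(dependencies):
--     prefixes = tuple(getPriorityList())
--     deps = list(dict.fromkeys(dependencies))
--     pri = [d for d in deps if d.startswith(prefixes)]
--     rest = [d for d in deps if not d.startswith(prefixes)]
--     return pri[::-1] + rest
-- ===== Notes on version B (the rewrite author's own statement) =====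
-- stated objective: alternative
-- what changed: A dedups and then mutates the list while iterating over it (index/pop/insert moving each priority-prefixed item to the front); B dedups once and partitions with two filters, returning the reversed priority items followed by the non-priority items in order.
import Mathlib
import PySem

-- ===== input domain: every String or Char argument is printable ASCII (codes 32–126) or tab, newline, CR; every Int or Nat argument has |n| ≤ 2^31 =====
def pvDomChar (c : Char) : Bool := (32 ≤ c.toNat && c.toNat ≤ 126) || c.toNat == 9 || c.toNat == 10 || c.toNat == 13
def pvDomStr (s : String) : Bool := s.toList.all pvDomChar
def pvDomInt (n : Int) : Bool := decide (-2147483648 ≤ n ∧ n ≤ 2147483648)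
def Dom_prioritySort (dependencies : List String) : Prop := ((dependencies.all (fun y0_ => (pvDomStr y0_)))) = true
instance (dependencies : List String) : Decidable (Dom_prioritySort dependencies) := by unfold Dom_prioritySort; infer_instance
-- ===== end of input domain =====

-- B replaces A's mutate-while-iterating loop (index/pop/insert per priority hit)
-- by one dedup plus two filters: reversed priority items followed by the rest, in order.

-- ===== PORT A =====
def getPriorityList : List String := ["pytorch", "tensorflow"]

-- dependencies.insert(0, dependencies.pop(dependencies.index(i))); i is always present, so the
-- none branches below are unreachable.
def pvMove (xs : List String) (i : String) : List String :=
  match PySem.List.index? xs i with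
  | none => xs
  | some j =>
    match PySem.List.pop? xs (j : Int) with
    | none => xs
    | some (v, rest) => PySem.List.insert rest 0 v

-- inner 'for priority in priorityList' body (the 'continue' just moves to the next priority)
def pvInner (xs : List String) (i : String) : List String :=
  getPriorityList.foldl (fun acc p => if PySem.Str.startswith i p then pvMove acc i else acc) xs

-- CPython's 'for i in dependencies' over the mutating list: advance an index while it is in
-- range; the list's length is invariant under pvMove, so fuel = initial length is exact.
def pvOuter (fuel : Nat) (k : Nat) (xs : List String) : List String :=
  match fuel with
  | 0 => xs
  | f + 1 =>
    match PySem.List.pyGet? xs (k : Int) with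
    | none => xs
    | some i => pvOuter f (k + 1) (pvInner xs i)

def prioritySort (dependencies : List String) : List String :=
  let deps := PySem.List.dedup dependencies
  pvOuter deps.length 0 deps

-- ===== PORT B =====
-- d.startswith(prefixes) for the tuple of priority prefixes
def pvIsPri (d : String) : Bool :=
  ["pytorch", "tensorflow"].any (fun p => PySem.Str.startswith d p)

def prioritySort_alt (dependencies : List String) : List String :=
  let deps := PySem.List.dedup dependencies
  let pri := deps.filter pvIsPri
  let rest := deps.filter (fun d => !pvIsPri d)
  pri.reverse ++ rest

-- ===== PRECONDITION & SPEC =====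
def Spec_prioritySort (dependencies : List String) (out : List String) : Prop := out = prioritySort_alt dependencies
instance (dependencies : List String) (out : List String) : Decidable (Spec_prioritySort dependencies out) := by unfold Spec_prioritySort; infer_instance

-- ===== CLAIM (what is proved, stated in full; the proofs are below) =====
def Claim_equal_prioritySort : Prop := ∀ (dependencies : List String), Dom_prioritySort dependencies → Spec_prioritySort dependencies (prioritySort dependencies)

-- ===== LEMMAS AND PROOFS =====

-- moving an element not occurring earlier to the front
theorem pvMove_spec (pre suf : List String) (i : String) (h : i ∉ pre) :
    pvMove (pre ++ i :: suf) i = i :: (pre ++ suf) := by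
  have hidx : PySem.List.index? (pre ++ i :: suf) i = some pre.length :=
    (PySem.List.index?_eq_some_iff _ _ _).mpr ⟨pre, suf, rfl, rfl, h⟩
  have hlt : pre.length < (pre ++ i :: suf).length := by simp
  have hpop := PySem.List.pop?_natCast (pre ++ i :: suf) pre.length hlt
  have hget : (pre ++ i :: suf)[pre.length]'hlt = i := by
    simp [List.getElem_append_right]
  have herase : (pre ++ i :: suf).eraseIdx pre.length = pre ++ suf := by
    simp [List.eraseIdx_append_of_length_le (le_refl pre.length)]
  simp only [pvMove, hidx, hpop, hget, herase, PySem.List.insert_zero]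

-- moving the front element is a no-op
theorem pvMove_cons_self (t : List String) (i : String) :
    pvMove (i :: t) i = i :: t := by
  simp only [pvMove, PySem.List.index?_cons_self, Nat.cast_zero,
    PySem.List.pop?_zero_cons, PySem.List.insert_zero]

-- the inner priority loop on a state "reversed priority part ++ rest part ++ current :: todo"
theorem pvInner_spec (A B suf : List String) (i : String)
    (hA : i ∉ A) (hB : i ∉ B) :
    pvInner (A ++ B ++ i :: suf) i
      = if pvIsPri i then i :: (A ++ B ++ suf) else A ++ B ++ i :: suf := by
  have hni : i ∉ A ++ B := by simp [hA, hB]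
  have h1 : pvMove (A ++ (B ++ i :: suf)) i = i :: (A ++ (B ++ suf)) := by
    simpa [List.append_assoc] using pvMove_spec (A ++ B) suf i hni
  simp only [pvInner, getPriorityList, List.foldl_cons, List.foldl_nil,
    pvIsPri, List.any_cons, List.any_nil, Bool.or_false]
  cases hsp : PySem.Str.startswith i "pytorch" <;>
    cases hst : PySem.Str.startswith i "tensorflow" <;>
      simp [h1, pvMove_cons_self]

-- main invariant of A's outer loop over a duplicate-free list
theorem pvOuter_inv : ∀ (suf pre : List String), (pre ++ suf).Nodup →
    pvOuter suf.length pre.length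
        ((pre.filter pvIsPri).reverse ++ pre.filter (fun d => !pvIsPri d) ++ suf)
      = ((pre ++ suf).filter pvIsPri).reverse ++ (pre ++ suf).filter (fun d => !pvIsPri d) := by
  intro suf
  induction suf with
  | nil => intro pre _; simp [pvOuter]
  | cons i suf' ih =>
    intro pre hnd
    have hipre : i ∉ pre := fun hm =>
      List.disjoint_of_nodup_append hnd hm (List.mem_cons_self ..)
    have hiA : i ∉ (pre.filter pvIsPri).reverse := fun hm =>
      hipre (List.mem_of_mem_filter (List.mem_reverse.mp hm))
    have hiB : i ∉ pre.filter (fun d => !pvIsPri d) := fun hm =>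
      hipre (List.mem_of_mem_filter hm)
    have hlen : ((pre.filter pvIsPri).reverse ++ pre.filter (fun d => !pvIsPri d)).length
        = pre.length := by
      simp [(List.length_eq_length_filter_add (l := pre) pvIsPri).symm]
    have hget : PySem.List.pyGet?
        ((pre.filter pvIsPri).reverse ++ pre.filter (fun d => !pvIsPri d) ++ i :: suf')
        (pre.length : Int) = some i := by
      rw [← hlen]
      exact PySem.List.pyGet?_append_length _ _ _
    have hinner := pvInner_spec (pre.filter pvIsPri).reverse
        (pre.filter (fun d => !pvIsPri d)) suf' i hiA hiB
    have hnd' : ((pre ++ [i]) ++ suf').Nodup := by simpa [List.append_assoc] using hnd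
    have ihp := ih (pre ++ [i]) hnd'
    show pvOuter (suf'.length + 1) pre.length _ = _
    rw [pvOuter, hget]
    simp only []
    rw [hinner]
    by_cases hpri : pvIsPri i = true
    · have hst : (i :: ((pre.filter pvIsPri).reverse
            ++ pre.filter (fun d => !pvIsPri d) ++ suf'))
          = ((pre ++ [i]).filter pvIsPri).reverse
            ++ (pre ++ [i]).filter (fun d => !pvIsPri d) ++ suf' := by
        simp [List.filter_append, hpri, List.append_assoc]
      rw [if_pos hpri, hst,
        show pre.length + 1 = (pre ++ [i]).length by simp, ihp]
      simp [List.append_assoc]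
    · have hpri' : pvIsPri i = false := by simpa using hpri
      have hst : ((pre.filter pvIsPri).reverse
            ++ pre.filter (fun d => !pvIsPri d) ++ i :: suf')
          = ((pre ++ [i]).filter pvIsPri).reverse
            ++ (pre ++ [i]).filter (fun d => !pvIsPri d) ++ suf' := by
        simp [List.filter_append, hpri', List.append_assoc]
      rw [if_neg hpri, hst,
        show pre.length + 1 = (pre ++ [i]).length by simp, ihp]
      simp [List.append_assoc]

-- ===== VERDICT (by name: the statement is the Claim_ definition above) =====
theorem prioritySort_spec : Claim_equal_prioritySort := by
  intro deps _
  show prioritySort deps = prioritySort_alt deps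
  unfold prioritySort prioritySort_alt
  have h := pvOuter_inv (PySem.List.dedup deps) [] (by simp)
  simpa using h
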